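-- pv_equiv track=rewrite | github.com/underthelights/open-fashion-clip | human_attribute/check_seat.py | crowd_seat
-- ===== SOURCE A (Python) =====
-- def crowd_seat(seat_info):
--     host_seat_idx = 2
--     first_seat_idx = 3
--     for idx, seat in enumerate(seat_info):
--         if seat[1] == 0:
--             host_seat_idx = idx
--         if seat[1] == 1:
--             first_seat_idx = idx
--
--     return host_seat_idx, first_seat_idx
-- ===== SOURCE B (Python) =====
-- def crowd_seat(seat_info):
--     host_seat_idx, first_seat_idx = 2, 3
--     host_found = first_found = False
--     for idx, seat in reversed(list(enumerate(seat_info))):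
--         if not host_found and seat[1] == 0:
--             host_seat_idx, host_found = idx, True
--         if not first_found and seat[1] == 1:
--             first_seat_idx, first_found = idx, True
--         if host_found and first_found:
--             break
--     return host_seat_idx, first_seat_idx
-- ===== Notes on version B (the rewrite author's own statement) =====
-- stated objective: alternative
-- what changed: Scans the seats in reverse with two found-flags and breaks as soon as both last occurrences are seen, instead of overwriting through the whole list forward.
import Mathlib
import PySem

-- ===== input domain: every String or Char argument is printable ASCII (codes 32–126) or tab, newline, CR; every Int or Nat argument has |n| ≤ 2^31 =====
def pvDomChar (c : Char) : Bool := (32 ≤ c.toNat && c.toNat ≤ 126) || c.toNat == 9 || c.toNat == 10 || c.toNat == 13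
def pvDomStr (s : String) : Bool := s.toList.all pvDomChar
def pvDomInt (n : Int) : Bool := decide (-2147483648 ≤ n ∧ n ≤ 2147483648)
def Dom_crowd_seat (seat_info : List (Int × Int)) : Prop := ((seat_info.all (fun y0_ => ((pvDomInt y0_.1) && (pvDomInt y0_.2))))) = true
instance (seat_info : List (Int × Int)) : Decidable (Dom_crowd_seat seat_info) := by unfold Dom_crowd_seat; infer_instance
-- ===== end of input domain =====

-- B scans in reverse with found-flags and an early break instead of A's forward overwrite; same return value.
-- ===== PORT A =====
def crowd_seat (seat_info : List (Int × Int)) : Int × Int :=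
  (PySem.List.enumerate seat_info).foldl
    (fun acc p =>
      let host := if p.2.2 == 0 then p.1 else acc.1
      let first := if p.2.2 == 1 then p.1 else acc.2
      (host, first))
    (2, 3)

-- ===== PORT B =====
def crowdSeatGoB : List (Int × (Int × Int)) → Int → Int → Bool → Bool → Int × Int
  | [], host, first, _, _ => (host, first)
  | (idx, seat) :: rest, host, first, hf, ff =>
    let (host, hf) := if !hf && seat.2 == 0 then (idx, true) else (host, hf)
    let (first, ff) := if !ff && seat.2 == 1 then (idx, true) else (first, ff)
    if hf && ff then (host, first) else crowdSeatGoB rest host first hf ff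

def crowd_seat_alt (seat_info : List (Int × Int)) : Int × Int :=
  crowdSeatGoB (PySem.List.enumerate seat_info).reverse 2 3 false false

-- ===== PRECONDITION & SPEC =====
def Spec_crowd_seat (seat_info : List (Int × Int)) (out : Int × Int) : Prop := out = crowd_seat_alt seat_info
instance (seat_info : List (Int × Int)) (out : Int × Int) : Decidable (Spec_crowd_seat seat_info out) := by unfold Spec_crowd_seat; infer_instance

-- ===== CLAIM (what is proved, stated in full; the proofs are below) =====
def Claim_equal_crowd_seat : Prop := ∀ (seat_info : List (Int × Int)), Dom_crowd_seat seat_info → Spec_crowd_seat seat_info (crowd_seat seat_info)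

-- ===== LEMMAS AND PROOFS =====

-- ===== VERDICT (by name: the statement is the Claim_ definition above) =====
-- the forward fold splits into two independent scalar folds
theorem crowd_fold_split (e : List (Int × (Int × Int))) (h f : Int) :
    e.foldl (fun acc p =>
      let host := if p.2.2 == 0 then p.1 else acc.1
      let first := if p.2.2 == 1 then p.1 else acc.2
      (host, first)) (h, f)
    = (e.foldl (fun a p => if p.2.2 == 0 then p.1 else a) h,
       e.foldl (fun a p => if p.2.2 == 1 then p.1 else a) f) := by
  induction e generalizing h f with
  | nil => rfl
  | cons x e ih => simp only [List.foldl_cons]; exact ih _ _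

theorem crowd_goB_host_found (e : List (Int × (Int × Int))) (h1 f : Int) :
    crowdSeatGoB e.reverse h1 f true false
      = (h1, e.foldl (fun a p => if p.2.2 == 1 then p.1 else a) f) := by
  induction e using List.reverseRecOn generalizing f with
  | nil => rfl
  | append_singleton e x ih =>
    rcases x with ⟨i, s⟩
    simp only [List.reverse_append, List.reverse_cons, List.reverse_nil, List.nil_append,
      List.cons_append, crowdSeatGoB, List.foldl_append, List.foldl_cons, List.foldl_nil]
    by_cases h : s.2 == 1 <;> simp [h, ih]

theorem crowd_goB_first_found (e : List (Int × (Int × Int))) (h f1 : Int) :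
    crowdSeatGoB e.reverse h f1 false true
      = (e.foldl (fun a p => if p.2.2 == 0 then p.1 else a) h, f1) := by
  induction e using List.reverseRecOn generalizing h with
  | nil => rfl
  | append_singleton e x ih =>
    rcases x with ⟨i, s⟩
    simp only [List.reverse_append, List.reverse_cons, List.reverse_nil, List.nil_append,
      List.cons_append, crowdSeatGoB, List.foldl_append, List.foldl_cons, List.foldl_nil]
    by_cases h0 : s.2 == 0 <;> simp [h0, ih]

theorem crowd_goB_main (e : List (Int × (Int × Int))) (h f : Int) :
    crowdSeatGoB e.reverse h f false false
      = (e.foldl (fun a p => if p.2.2 == 0 then p.1 else a) h,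
         e.foldl (fun a p => if p.2.2 == 1 then p.1 else a) f) := by
  induction e using List.reverseRecOn generalizing h f with
  | nil => rfl
  | append_singleton e x ih =>
    rcases x with ⟨i, s⟩
    simp only [List.reverse_append, List.reverse_cons, List.reverse_nil, List.nil_append,
      List.cons_append, crowdSeatGoB, List.foldl_append, List.foldl_cons, List.foldl_nil]
    by_cases h0 : s.2 == 0 <;> by_cases h1 : s.2 == 1 <;>
      simp_all [crowd_goB_host_found, crowd_goB_first_found]

theorem crowd_seat_spec : Claim_equal_crowd_seat := by
  intro seat_info _
  unfold Spec_crowd_seat crowd_seat crowd_seat_alt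
  rw [crowd_fold_split, crowd_goB_main]
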